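-- pv_equiv track=rewrite | github.com/V1B3hR/bioart | src/biological/error_correction.py | _add_sync_markers
-- ===== SOURCE A (Python) =====
-- def _add_sync_markers(sequence: str) -> str:
--     """Add synchronization markers"""
--     # Add start and end markers
--     start_marker = "AUAUAUAU"  # Distinctive pattern
--     end_marker = "CGGCCGGC"    # Another distinctive pattern
--
--     # Add periodic sync markers throughout sequence
--     marked_sequence = [start_marker]
--
--     for i, nucleotide in enumerate(sequence):
--         marked_sequence.append(nucleotide)
--
--         # Add sync marker every 64 nucleotides
--         if (i + 1) % 64 == 0:
--             marked_sequence.append("AUCG")  # Short sync marker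
--
--     marked_sequence.append(end_marker)
--
--     return ''.join(marked_sequence)
-- ===== SOURCE B (Python) =====
-- def _add_sync_markers(sequence: str) -> str:
--     """Add synchronization markers (block-wise re-implementation)."""
--     pieces = ["AUAUAUAU"]
--     i = 0
--     n = len(sequence)
--     while i < n:
--         chunk = sequence[i:i + 64]
--         pieces.append(chunk)
--         if len(chunk) == 64:
--             pieces.append("AUCG")
--         i += 64
--     pieces.append("CGGCCGGC")
--     return ''.join(pieces)
-- ===== Notes on version B (the rewrite author's own statement) =====
-- stated objective: simpler
-- what changed: B walks the sequence in 64-character slices, appending each whole chunk and a sync marker only when the chunk is full, instead of A's character-by-character loop with a modulo counter.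
import Mathlib
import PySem

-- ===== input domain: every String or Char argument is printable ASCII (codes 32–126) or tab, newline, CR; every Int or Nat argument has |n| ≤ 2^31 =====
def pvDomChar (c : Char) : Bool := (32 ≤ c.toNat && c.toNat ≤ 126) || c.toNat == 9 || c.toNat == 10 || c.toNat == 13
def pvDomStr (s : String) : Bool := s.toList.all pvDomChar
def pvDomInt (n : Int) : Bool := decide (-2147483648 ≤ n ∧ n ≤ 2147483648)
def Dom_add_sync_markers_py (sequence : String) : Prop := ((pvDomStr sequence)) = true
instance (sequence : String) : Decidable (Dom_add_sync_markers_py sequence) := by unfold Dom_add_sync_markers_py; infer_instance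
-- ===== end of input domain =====

-- B re-traverses the sequence in 64-character slices (whole chunk + marker when the chunk is
-- full) instead of A's per-character loop with a modulo counter; objective: simpler.

-- ===== PORT A =====
-- for i, nucleotide in enumerate(sequence): append nucleotide; if (i+1) % 64 == 0: append "AUCG"
def add_sync_markers_py (sequence : String) : String :=
  let start_marker := "AUAUAUAU"
  let end_marker := "CGGCCGGC"
  let marked_sequence : List String := [start_marker]
  let marked_sequence :=
    (PySem.List.enumerate sequence.toList 0).foldl
      (fun acc ic =>
        let acc := acc ++ [String.ofList [ic.2]]
        if (ic.1 + 1) % 64 == 0 then acc ++ ["AUCG"] else acc)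
      marked_sequence
  let marked_sequence := marked_sequence ++ [end_marker]
  PySem.Str.join "" marked_sequence

-- ===== PORT B =====
-- the while loop of Source B: chunk = sequence[i:i+64]; append chunk; marker iff len(chunk) == 64
def addSyncChunks (l : List Char) : List String :=
  if l = [] then []
  else
    let chunk := l.take 64
    String.ofList chunk :: ((if chunk.length == 64 then ["AUCG"] else []) ++ addSyncChunks (l.drop 64))
termination_by l.length
decreasing_by
  rename_i h
  have : l.length ≠ 0 := fun h0 => h (List.eq_nil_of_length_eq_zero h0)
  simp [List.length_drop]; omega

def add_sync_markers_py_alt (sequence : String) : String :=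
  PySem.Str.join "" (["AUAUAUAU"] ++ addSyncChunks sequence.toList ++ ["CGGCCGGC"])

-- ===== PRECONDITION & SPEC =====
def Spec_add_sync_markers_py (sequence : String) (out : String) : Prop := out = add_sync_markers_py_alt sequence
instance (sequence : String) (out : String) : Decidable (Spec_add_sync_markers_py sequence out) := by unfold Spec_add_sync_markers_py; infer_instance

-- ===== CLAIM (what is proved, stated in full; the proofs are below) =====
def Claim_equal_add_sync_markers_py : Prop := ∀ (sequence : String), Dom_add_sync_markers_py sequence → Spec_add_sync_markers_py sequence (add_sync_markers_py sequence)

-- ===== LEMMAS AND PROOFS =====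

-- char-level rendering of A's loop, with the running index i
def fA : List Char → Nat → List Char
  | [], _ => []
  | c :: cs, i => c :: ((if (i + 1) % 64 = 0 then ['A','U','C','G'] else []) ++ fA cs (i + 1))

-- char-level rendering of A's loop with a countdown-to-marker counter instead of the index
def gA : List Char → Nat → List Char
  | [], _ => []
  | c :: cs, r => c :: (if r = 1 then ['A','U','C','G'] ++ gA cs 64 else gA cs (r - 1))

-- char-level rendering of B's chunk loop
def fB (l : List Char) : List Char :=
  if l = [] then []
  else l.take 64 ++ ((if (l.take 64).length = 64 then ['A','U','C','G'] else []) ++ fB (l.drop 64))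
termination_by l.length
decreasing_by
  rename_i h
  have : l.length ≠ 0 := fun h0 => h (List.eq_nil_of_length_eq_zero h0)
  simp [List.length_drop]; omega

theorem fA_eq_gA (l : List Char) (i : Nat) : fA l i = gA l (64 - i % 64) := by
  induction l generalizing i with
  | nil => simp [fA, gA]
  | cons c cs ih =>
    simp only [fA, gA]
    by_cases h : i % 64 = 63
    · have h1 : (i + 1) % 64 = 0 := by omega
      have h2 : 64 - i % 64 = 1 := by omega
      simp [h1, h2, ih (i + 1)]
    · have hlt : i % 64 < 64 := Nat.mod_lt _ (by norm_num)
      have h1 : (i + 1) % 64 = i % 64 + 1 := by omega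
      have h2 : 64 - i % 64 ≠ 1 := by omega
      simp [h1, h2, ih (i + 1)]
      congr 1
      omega

theorem gA_chunk (r : Nat) (l : List Char) (h1 : 1 ≤ r) (h64 : r ≤ 64) :
    gA l r = l.take r ++ (if r ≤ l.length then ['A','U','C','G'] ++ gA (l.drop r) 64 else []) := by
  induction l generalizing r with
  | nil => simp [gA]; omega
  | cons c cs ih =>
    by_cases hr : r = 1
    · subst hr
      simp [gA]
    · have hr2 : 2 ≤ r := by omega
      have hrm : r - 1 + 1 = r := by omega
      simp only [gA, if_neg hr]
      rw [ih (r - 1) (by omega) (by omega)]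
      rcases Nat.exists_eq_add_of_le hr2 with ⟨k, hk⟩
      rw [show (c :: cs).take r = c :: cs.take (r - 1) by
            conv_lhs => rw [← hrm]
            simp [List.take_succ_cons],
          show (c :: cs).drop r = cs.drop (r - 1) by
            conv_lhs => rw [← hrm]
            simp [List.drop_succ_cons]]
      simp only [List.length_cons]
      by_cases hc : r - 1 ≤ cs.length
      · rw [if_pos hc, if_pos (by omega)]; simp
      · rw [if_neg hc, if_neg (by omega)]; simp

theorem gA_eq_fB (n : Nat) (l : List Char) (hn : l.length ≤ n) : gA l 64 = fB l := by
  induction n generalizing l with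
  | zero =>
    have : l = [] := List.eq_nil_of_length_eq_zero (by omega)
    subst this; simp [gA, fB]
  | succ n ih =>
    by_cases hl : l = []
    · subst hl; simp [gA, fB]
    · rw [gA_chunk 64 l (by norm_num) (by norm_num)]
      rw [fB, if_neg hl]
      have hlen : (l.take 64).length = min 64 l.length := by simp
      by_cases hc : 64 ≤ l.length
      · rw [if_pos hc, if_pos (by omega)]
        have : l.length ≠ 0 := fun h0 => hl (List.eq_nil_of_length_eq_zero h0)
        rw [ih (l.drop 64) (by simp [List.length_drop]; omega)]
      · rw [if_neg hc, if_neg (by omega)]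
        have : l.drop 64 = [] := List.drop_eq_nil_of_le (by omega)
        rw [this, List.take_of_length_le (by omega)]
        simp [fB]

-- joining with the empty separator is flattening
theorem join_empty_flatten (xs : List (List Char)) :
    PySem.Chars.join [] xs = xs.flatten := by
  induction xs with
  | nil => simp [PySem.Chars.join_nil]
  | cons p rest ih =>
    cases rest with
    | nil => simp [PySem.Chars.join_singleton]
    | cons q rest' => rw [PySem.Chars.join_cons_cons]; simp [ih]

-- A's joined middle part is fA
theorem A_mid (l : List Char) (s : Nat) :
    (((PySem.List.enumerate l (s : Int)).flatMap
        (fun ic => [String.ofList [ic.2]] ++ (if (ic.1 + 1) % 64 == 0 then ["AUCG"] else []))).map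
      String.toList).flatten = fA l s := by
  induction l generalizing s with
  | nil => simp [PySem.List.enumerate_nil, fA]
  | cons c cs ih =>
    rw [PySem.List.enumerate_cons]
    have hcast : (s : Int) + 1 = ((s + 1 : Nat) : Int) := by push_cast; ring
    simp only [List.flatMap_cons, List.map_append, List.flatten_append, hcast, fA,
      ih (s + 1)]
    by_cases h : (s + 1) % 64 = 0 <;>
      simp [h, show ((64 : Int) ∣ (s : Int) + 1) ↔ (s + 1) % 64 = 0 from by omega]

theorem A_mid0 (l : List Char) :
    (((PySem.List.enumerate l 0).flatMap
        (fun ic => [String.ofList [ic.2]] ++ (if (ic.1 + 1) % 64 == 0 then ["AUCG"] else []))).map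
      String.toList).flatten = fA l 0 := by
  simpa using A_mid l 0

-- B's joined middle part is fB
theorem B_mid (l : List Char) :
    ((addSyncChunks l).map String.toList).flatten = fB l := by
  induction hn : l.length using Nat.strong_induction_on generalizing l with
  | _ n ih =>
    by_cases hl : l = []
    · subst hl; simp [addSyncChunks, fB]
    · rw [addSyncChunks, if_neg hl, fB, if_neg hl]
      have hlen0 : l.length ≠ 0 := fun h0 => hl (List.eq_nil_of_length_eq_zero h0)
      have hdrop : (l.drop 64).length < n := by simp [List.length_drop]; omega
      rw [List.map_cons, List.flatten_cons]
      have hmin : (l.take 64).length = min 64 l.length := by simp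
      by_cases hc : 64 ≤ l.length
      · have h1 : (l.take 64).length = 64 := by omega
        simp [h1, String.toList_ofList, ih (l.drop 64).length (by omega) (l.drop 64) rfl]
      · have h1 : (l.take 64).length ≠ 64 := by omega
        simp [hc, String.toList_ofList, ih (l.drop 64).length (by omega) (l.drop 64) rfl]

theorem ports_agree (sequence : String) :
    add_sync_markers_py sequence = add_sync_markers_py_alt sequence := by
  rw [← String.toList_inj]
  unfold add_sync_markers_py add_sync_markers_py_alt
  simp only []
  rw [show (fun (acc : List String) (ic : Int × Char) =>
        let acc := acc ++ [String.ofList [ic.2]]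
        if (ic.1 + 1) % 64 == 0 then acc ++ ["AUCG"] else acc) =
      (fun (acc : List String) (ic : Int × Char) =>
        acc ++ ([String.ofList [ic.2]] ++ (if (ic.1 + 1) % 64 == 0 then ["AUCG"] else []))) by
    funext acc ic
    by_cases h : ((ic.1 + 1) % 64 == 0) = true <;> simp [h]]
  rw [PySem.List.foldl_append_eq_flatMap]
  rw [PySem.Str.toList_join, PySem.Str.toList_join]
  have hsep : ("" : String).toList = [] := rfl
  rw [hsep, join_empty_flatten, join_empty_flatten]
  simp only [List.map_append, List.flatten_append, List.map_cons, List.flatten_cons]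
  rw [A_mid0 sequence.toList, B_mid sequence.toList, fA_eq_gA, gA_eq_fB sequence.toList.length _ le_rfl]

-- ===== VERDICT (by name: the statement is the Claim_ definition above) =====
theorem add_sync_markers_py_spec : Claim_equal_add_sync_markers_py := by
  intro sequence _
  unfold Spec_add_sync_markers_py
  exact ports_agree sequence
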